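-- pv_equiv track=rewrite | github.com/alekov1/KovalenkoAR | Lesson10/1/1.py | ReturnMatrix
-- ===== SOURCE A (Python) =====
-- def ReturnMatrix(matrix: []):
--     New_matrix = []
--     for i in range(len(matrix)):
--         for j in range(len(matrix)):
--             if matrix[i][j] == 0:
--                 matrix[i][j] = matrix[i-1][j]
--             New_matrix.append(matrix[i][j])
--     return New_matrix
-- ===== SOURCE B (Python) =====
-- def ReturnMatrix(matrix):
--     # Column-major: build each filled column independently, then transpose
--     # back to a row-major flat list.  (Return value only: does not mutate matrix.)
--     n = len(matrix)
--     cols = []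
--     for j in range(n):
--         c = [row[j] for row in matrix]
--         f = []
--         for i in range(n):
--             if c[i] != 0:
--                 f.append(c[i])
--             elif i == 0:
--                 f.append(c[-1])
--             else:
--                 f.append(f[-1])
--         cols.append(f)
--     return [v for tup in zip(*cols) for v in tup]
-- ===== Notes on version B (the rewrite author's own statement) =====
-- stated objective: alternative
-- what changed: A does one row-major in-place pass, overwriting zeros with the cell above (with matrix[-1] wraparound) while appending to the flat result; B works column-major: it extracts each column, fills its zeros by a per-column scan (seeding index 0 from the column's last original entry), and finally transposes the filled columns back into a row-major flat list with zip(*cols), without mutating the input.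
import Mathlib
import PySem

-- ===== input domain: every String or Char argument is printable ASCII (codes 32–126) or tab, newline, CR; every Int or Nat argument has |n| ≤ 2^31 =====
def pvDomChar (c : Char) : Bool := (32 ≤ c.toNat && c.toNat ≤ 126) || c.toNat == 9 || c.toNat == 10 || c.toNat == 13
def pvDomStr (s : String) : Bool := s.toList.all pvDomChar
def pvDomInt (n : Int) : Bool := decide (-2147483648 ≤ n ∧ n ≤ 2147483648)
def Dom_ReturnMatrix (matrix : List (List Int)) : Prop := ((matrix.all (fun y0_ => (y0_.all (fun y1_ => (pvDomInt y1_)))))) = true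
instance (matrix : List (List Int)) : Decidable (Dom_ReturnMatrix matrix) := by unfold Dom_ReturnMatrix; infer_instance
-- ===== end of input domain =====

-- B replaces A's row-major in-place fill-while-flattening by a column-major algorithm:
-- each filled column is built independently, then the columns are transposed back into a
-- row-major flat list (alternative decomposition; equivalence is about the RETURN value
-- only: A mutates its argument in place, B does not).

-- ===== PORT A =====
-- one step of A's inner loop: read matrix[i][j]; if it is 0, write matrix[i-1][j] into
-- matrix[i][j] (index -1 wraps to the last row, via pyGet?); append matrix[i][j] (after the
-- possible assignment) to New_matrix
def astep (i : Nat) (st : List (List Int) × List Int) (j : Nat) : List (List Int) × List Int :=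
  let m := st.1
  let v := (m.getD i []).getD j 0
  if v = 0 then
    let w := ((PySem.List.pyGet? m ((i : Int) - 1)).getD []).getD j 0
    (m.set i ((m.getD i []).set j w), st.2 ++ [w])
  else (m, st.2 ++ [v])

def ReturnMatrix (matrix : List (List Int)) : List Int :=
  let n := matrix.length
  ((List.range n).foldl (fun st i => (List.range n).foldl (astep i) st) (matrix, [])).2

-- ===== PORT B =====
-- one step of B's per-column fill loop: f.append(c[i] if c[i]!=0 else (c[-1] if i==0 else f[-1]))
def fstep (c : List Int) (n : Nat) (f : List Int) (i : Nat) : List Int :=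
  if c.getD i 0 ≠ 0 then f ++ [c.getD i 0]
  else if i = 0 then f ++ [c.getD (n - 1) 0]      -- c[-1]: c has length n here
  else f ++ [f.getD (f.length - 1) 0]             -- f[-1]

def fillCol (c : List Int) (n : Nat) : List Int :=
  (List.range n).foldl (fstep c n) []

def ReturnMatrix_alt (matrix : List (List Int)) : List Int :=
  let n := matrix.length
  let cols := (List.range n).map (fun j => fillCol (matrix.map (fun row => row.getD j 0)) n)
  -- zip(*cols) flattened: exact here since every filled column has length n
  (List.range n).flatMap (fun i => cols.map (fun c => c.getD i 0))

-- ===== PRECONDITION & SPEC =====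
-- A raises IndexError exactly when some row is shorter than len(matrix); Pre_ excludes those inputs.
def Pre_ReturnMatrix (matrix : List (List Int)) : Prop :=
  ∀ row ∈ matrix, matrix.length ≤ row.length
instance (matrix : List (List Int)) : Decidable (Pre_ReturnMatrix matrix) := by
  unfold Pre_ReturnMatrix; infer_instance

def pvWitness_ReturnMatrix : List (List Int) := [[1, 0], [0, 2]]

def Spec_ReturnMatrix (matrix : List (List Int)) (out : List Int) : Prop := out = ReturnMatrix_alt matrix
instance (matrix : List (List Int)) (out : List Int) : Decidable (Spec_ReturnMatrix matrix out) := by unfold Spec_ReturnMatrix; infer_instance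

-- ===== CLAIM (what is proved, stated in full; the proofs are below) =====
def Claim_equal_ReturnMatrix : Prop := ∀ (matrix : List (List Int)), Dom_ReturnMatrix matrix → Pre_ReturnMatrix matrix → Spec_ReturnMatrix matrix (ReturnMatrix matrix)

-- ===== LEMMAS AND PROOFS =====

-- one filled row from the previous filled row (proof-side description of the fill recurrence)
def rstep (n : Nat) (prev row : List Int) : List Int :=
  (List.range n).map (fun j => if row.getD j 0 ≠ 0 then row.getD j 0 else prev.getD j 0)

-- the filled rows, flattened (what A's in-place pass produces)
def bRows (n : Nat) (prev : List Int) : List (List Int) → List Int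
  | [] => []
  | r :: rs => rstep n prev r ++ bRows n (rstep n prev r) rs

-- the i-th filled row
def chainRow (n : Nat) : List Int → List (List Int) → Nat → List Int
  | _, [], _ => []
  | prev, r :: _, 0 => rstep n prev r
  | prev, r :: rs, i + 1 => chainRow n (rstep n prev r) rs i

theorem rstep_getD (n : Nat) (prev row : List Int) (j : Nat) (hj : j < n) :
    (rstep n prev row).getD j 0 =
      (if row.getD j 0 ≠ 0 then row.getD j 0 else prev.getD j 0) := by
  simp [rstep, List.getD_eq_getElem?_getD, hj]

theorem rstep_length (n : Nat) (prev row : List Int) : (rstep n prev row).length = n := by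
  simp [rstep]

theorem getD_set_self (l : List Int) (a : Nat) (w : Int) (h : a < l.length) :
    (l.set a w).getD a 0 = w := by
  simp [List.getD_eq_getElem?_getD, h]

theorem getD_set_ne (l : List Int) (a j : Nat) (w : Int) (h : j ≠ a) :
    (l.set a w).getD j 0 = l.getD j 0 := by
  simp [List.getD_eq_getElem?_getD, List.getElem?_set_ne (Ne.symm h)]

theorem getD_row_set (m : List (List Int)) (i : Nat) (r : List Int) (h : i < m.length) :
    (m.set i r).getD i [] = r := by
  simp [List.getD_eq_getElem?_getD, h]

theorem getD_append_len (done rs : List (List Int)) (r : List Int) :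
    (done ++ r :: rs).getD done.length [] = r := by
  rw [List.getD_eq_getElem?_getD, List.getElem?_append_right (Nat.le_refl _)]
  simp

theorem set_append_len (done rs : List (List Int)) (r r' : List Int) :
    (done ++ r :: rs).set done.length r' = done ++ r' :: rs := by
  rw [List.set_append_right _ _ (Nat.le_refl _)]
  simp

theorem snapshot_stable (m : List (List Int)) (i a : Nat) (w : Int) (j : Nat)
    (him : i < m.length) (hja : j ≠ a) :
    ((PySem.List.pyGet? (m.set i ((m.getD i []).set a w)) ((i : Int) - 1)).getD []).getD j 0
      = ((PySem.List.pyGet? m ((i : Int) - 1)).getD []).getD j 0 := by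
  rcases Nat.eq_zero_or_pos i with hi | hi
  · subst hi
    simp only [Nat.cast_zero, zero_sub]
    rw [PySem.List.pyGet?_neg_one, PySem.List.pyGet?_neg_one]
    cases m with
    | nil => simp at him
    | cons x xs =>
      cases xs with
      | nil =>
        simp [List.getLast?, List.getD_eq_getElem?_getD, List.getElem?_set_ne (Ne.symm hja)]
      | cons y ys =>
        simp [List.getLast?_cons_cons]
  · have h1 : (i : Int) - 1 = ((i - 1 : Nat) : Int) := by omega
    rw [h1, PySem.List.pyGet?_natCast, PySem.List.pyGet?_natCast,
      List.getElem?_set_ne (by omega)]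

theorem inner_loop (i : Nat) (b : Nat) : ∀ (a : Nat) (m : List (List Int)) (out : List Int),
    i < m.length → a + b ≤ (m.getD i []).length →
    ∃ r', ((List.range' a b).foldl (astep i) (m, out)) =
        (m.set i r',
         out ++ (List.range' a b).map (fun j =>
            if (m.getD i []).getD j 0 ≠ 0 then (m.getD i []).getD j 0
            else ((PySem.List.pyGet? m ((i : Int) - 1)).getD []).getD j 0))
      ∧ r'.length = (m.getD i []).length
      ∧ (∀ j, a ≤ j → j < a + b → r'.getD j 0 =
            (if (m.getD i []).getD j 0 ≠ 0 then (m.getD i []).getD j 0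
             else ((PySem.List.pyGet? m ((i : Int) - 1)).getD []).getD j 0))
      ∧ (∀ j, j < a ∨ a + b ≤ j → r'.getD j 0 = (m.getD i []).getD j 0) := by
  induction b with
  | zero =>
    intro a m out him _
    refine ⟨m.getD i [], ?_, rfl, fun j h1 h2 => absurd h2 (by omega), fun j _ => rfl⟩
    have h1 : m.set i (m.getD i []) = m := by
      rw [List.getD_eq_getElem m [] him]
      exact List.set_getElem_self him
    simp only [List.range'_zero, List.foldl_nil, List.map_nil, List.append_nil, h1]
  | succ b ih =>
    intro a m out him hlen
    rw [List.range'_succ, List.foldl_cons]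
    by_cases hv : (m.getD i []).getD a 0 = 0
    · -- write branch: w := matrix[i-1][a]
      have hstep : astep i (m, out) a =
          (m.set i ((m.getD i []).set a (((PySem.List.pyGet? m ((i : Int) - 1)).getD []).getD a 0)),
           out ++ [((PySem.List.pyGet? m ((i : Int) - 1)).getD []).getD a 0]) := by
        dsimp only [astep]; rw [if_pos hv]
      rw [hstep]
      have him1 : i < (m.set i ((m.getD i []).set a
          (((PySem.List.pyGet? m ((i : Int) - 1)).getD []).getD a 0))).length := by
        simpa using him
      have hrow1 : (m.set i ((m.getD i []).set a
            (((PySem.List.pyGet? m ((i : Int) - 1)).getD []).getD a 0))).getD i []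
          = (m.getD i []).set a (((PySem.List.pyGet? m ((i : Int) - 1)).getD []).getD a 0) :=
        getD_row_set m i _ him
      have hlen1 : (a + 1) + b ≤ ((m.set i ((m.getD i []).set a
          (((PySem.List.pyGet? m ((i : Int) - 1)).getD []).getD a 0))).getD i []).length := by
        rw [hrow1, List.length_set]; omega
      obtain ⟨r', heq, hr'len, hin, hout⟩ := ih (a + 1) _ _ him1 hlen1
      have hrowstab : ∀ j, j ≠ a →
          ((m.set i ((m.getD i []).set a
              (((PySem.List.pyGet? m ((i : Int) - 1)).getD []).getD a 0))).getD i []).getD j 0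
            = (m.getD i []).getD j 0 := by
        intro j hj; rw [hrow1]; exact getD_set_ne _ a j _ hj
      have hsnapstab : ∀ j, j ≠ a →
          ((PySem.List.pyGet? (m.set i ((m.getD i []).set a
              (((PySem.List.pyGet? m ((i : Int) - 1)).getD []).getD a 0))) ((i : Int) - 1)).getD []).getD j 0
            = ((PySem.List.pyGet? m ((i : Int) - 1)).getD []).getD j 0 :=
        fun j hj => snapshot_stable m i a _ j him hj
      have hmap : (List.range' (a + 1) b).map (fun j =>
            if ((m.set i ((m.getD i []).set a
                (((PySem.List.pyGet? m ((i : Int) - 1)).getD []).getD a 0))).getD i []).getD j 0 ≠ 0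
            then ((m.set i ((m.getD i []).set a
                (((PySem.List.pyGet? m ((i : Int) - 1)).getD []).getD a 0))).getD i []).getD j 0
            else ((PySem.List.pyGet? (m.set i ((m.getD i []).set a
                (((PySem.List.pyGet? m ((i : Int) - 1)).getD []).getD a 0))) ((i : Int) - 1)).getD []).getD j 0)
          = (List.range' (a + 1) b).map (fun j =>
            if (m.getD i []).getD j 0 ≠ 0 then (m.getD i []).getD j 0
            else ((PySem.List.pyGet? m ((i : Int) - 1)).getD []).getD j 0) := by
        apply List.map_congr_left
        intro j hj
        obtain ⟨k, hk, hjeq⟩ := List.mem_range'.mp hj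
        have hja : j ≠ a := by omega
        rw [hrowstab _ hja, hsnapstab _ hja]
      refine ⟨r', ?_, ?_, ?_, ?_⟩
      · rw [heq, hmap, List.set_set, List.map_cons]
        have hfa : (if (m.getD i []).getD a 0 ≠ 0 then (m.getD i []).getD a 0
            else ((PySem.List.pyGet? m ((i : Int) - 1)).getD []).getD a 0)
            = ((PySem.List.pyGet? m ((i : Int) - 1)).getD []).getD a 0 := by
          rw [if_neg (by simpa using hv)]
        rw [hfa]
        simp [List.append_assoc]
      · rw [hr'len, hrow1, List.length_set]
      · intro j hja hjb
        by_cases hj : j = a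
        · subst hj
          rw [hout j (Or.inl (by omega)), hrow1,
            getD_set_self _ j _ (by omega), if_neg (by simpa using hv)]
        · rw [hin j (by omega) (by omega), hrowstab _ hj, hsnapstab _ hj]
      · intro j hj
        have hja : j ≠ a := by omega
        rw [hout j (by omega), hrowstab _ hja]
    · -- no-write branch
      have hstep : astep i (m, out) a = (m, out ++ [(m.getD i []).getD a 0]) := by
        dsimp only [astep]; rw [if_neg hv]
      rw [hstep]
      obtain ⟨r', heq, hr'len, hin, hout⟩ := ih (a + 1) m _ him (by omega)
      refine ⟨r', ?_, hr'len, ?_, ?_⟩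
      · rw [heq, List.map_cons, if_pos hv]
        simp [List.append_assoc]
      · intro j hja hjb
        by_cases hj : j = a
        · subst hj
          rw [hout j (Or.inl (by omega)), if_pos hv]
        · exact hin j (by omega) (by omega)
      · intro j hj
        exact hout j (by omega)

theorem outer_loop (n : Nat) (rest : List (List Int)) :
    ∀ (done : List (List Int)) (out prev : List Int),
    done.length + rest.length = n →
    (∀ r ∈ rest, n ≤ r.length) →
    (∀ r ∈ done, n ≤ r.length) →
    (∀ j, j < n →
      ((PySem.List.pyGet? (done ++ rest) ((done.length : Int) - 1)).getD []).getD j 0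
        = prev.getD j 0) →
    ((List.range' done.length rest.length).foldl
        (fun st i => (List.range n).foldl (astep i) st) (done ++ rest, out)).2
      = out ++ bRows n prev rest := by
  induction rest with
  | nil => intro done out prev _ _ _ _; simp [bRows]
  | cons r rs ih =>
    intro done out prev hn hrest hdone hprev
    rw [List.length_cons, List.range'_succ, List.foldl_cons]
    have hk : done.length < (done ++ r :: rs).length := by simp
    have hrowk : (done ++ r :: rs).getD done.length [] = r := getD_append_len done rs r
    have hlen0 : 0 + n ≤ ((done ++ r :: rs).getD done.length []).length := by
      rw [hrowk]; simpa using hrest r (by simp)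
    rw [List.range_eq_range']
    obtain ⟨r', heq, hr'len, hin, hout⟩ := inner_loop done.length n 0 (done ++ r :: rs) out hk hlen0
    have hseg : (List.range' 0 n).map (fun j =>
          if ((done ++ r :: rs).getD done.length []).getD j 0 ≠ 0
          then ((done ++ r :: rs).getD done.length []).getD j 0
          else ((PySem.List.pyGet? (done ++ r :: rs) ((done.length : Int) - 1)).getD []).getD j 0)
        = rstep n prev r := by
      rw [rstep, List.range_eq_range']
      apply List.map_congr_left
      intro j hj
      obtain ⟨k', hk', hjeq⟩ := List.mem_range'.mp hj
      have hjn : j < n := by omega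
      rw [hrowk, hprev j hjn]
    rw [heq, hseg, set_append_len done rs r r']
    have hstep2 : done ++ r' :: rs = (done ++ [r']) ++ rs := by simp
    have hlen' : (done ++ [r']).length = done.length + 1 := by simp
    have hih := ih (done ++ [r']) (out ++ rstep n prev r) (rstep n prev r)
      (by rw [hlen']; simp only [List.length_cons] at hn; omega)
      (fun t ht => hrest t (by simp [ht]))
      (by
        intro t ht
        rcases List.mem_append.mp ht with h | h
        · exact hdone t h
        · have : t = r' := by simpa using h
          subst this
          rw [hr'len, hrowk]
          exact hrest r (by simp))
      (by
        intro j hjn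
        rw [hlen']
        have hcast : ((done.length + 1 : Nat) : Int) - 1 = ((done.length : Nat) : Int) := by
          push_cast; ring
        rw [hcast]
        rw [PySem.List.pyGet?_natCast]
        rw [← hstep2]
        have : (done ++ r' :: rs)[done.length]? = some r' := by
          rw [List.getElem?_append_right (Nat.le_refl _)]; simp
        rw [this]
        simp only [Option.getD_some]
        have h1 := hin j (Nat.zero_le j) (by omega)
        rw [h1, hrowk, hprev j hjn, rstep_getD n prev r j hjn])
    rw [← hstep2] at hih
    rw [hlen'] at hih
    simp only [List.range_eq_range'] at hih
    rw [hih, bRows]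
    simp [List.append_assoc]

-- A's result equals the flattened chain of filled rows
theorem bRows_eq_flat (n : Nat) (rows : List (List Int)) : ∀ prev,
    bRows n prev rows = (List.range rows.length).flatMap (chainRow n prev rows) := by
  induction rows with
  | nil => intro prev; simp [bRows]
  | cons r rs ih =>
    intro prev
    rw [bRows, List.length_cons, List.range_succ_eq_map, List.flatMap_cons, ih]
    congr 1
    rw [List.flatMap_map]
    rfl

theorem chain_length (n : Nat) : ∀ (rows : List (List Int)) (prev : List Int) (i : Nat),
    i < rows.length → (chainRow n prev rows i).length = n := by
  intro rows
  induction rows with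
  | nil => intro prev i h; simp at h
  | cons r rs ih =>
    intro prev i h
    cases i with
    | zero => simp [chainRow, rstep_length]
    | succ i => exact ih (rstep n prev r) i (by simpa using h)

theorem chain_zero_getD (n : Nat) (prev : List Int) (r : List Int) (rs : List (List Int))
    (j : Nat) (hj : j < n) :
    (chainRow n prev (r :: rs) 0).getD j 0 =
      (if r.getD j 0 ≠ 0 then r.getD j 0 else prev.getD j 0) := by
  simp only [chainRow]; exact rstep_getD n prev r j hj

theorem chain_succ_getD (n : Nat) (i : Nat) :
    ∀ (prev : List Int) (rows : List (List Int)) (j : Nat), j < n → i + 1 < rows.length →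
    (chainRow n prev rows (i + 1)).getD j 0 =
      (if (rows.getD (i + 1) []).getD j 0 ≠ 0 then (rows.getD (i + 1) []).getD j 0
       else (chainRow n prev rows i).getD j 0) := by
  induction i with
  | zero =>
    intro prev rows j hj hi
    cases rows with
    | nil => simp at hi
    | cons r rs =>
      cases rs with
      | nil => simp at hi
      | cons r' rs' =>
        simp only [chainRow]
        rw [rstep_getD n (rstep n prev r) r' j hj]
        simp
  | succ i ih =>
    intro prev rows j hj hi
    cases rows with
    | nil => simp at hi
    | cons r rs =>
      simp only [chainRow]
      rw [ih (rstep n prev r) rs j hj (by simpa using hi)]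
      simp

-- closed-form fill value of cell (i, j) of the original matrix
def Gm (matrix : List (List Int)) (n : Nat) (j : Nat) : Nat → Int
  | 0 =>
    if (matrix.getD 0 []).getD j 0 ≠ 0 then (matrix.getD 0 []).getD j 0
    else (matrix.getD (n - 1) []).getD j 0
  | i + 1 =>
    if (matrix.getD (i + 1) []).getD j 0 ≠ 0 then (matrix.getD (i + 1) []).getD j 0
    else Gm matrix n j i

theorem chain_eq_Gm (n : Nat) (matrix : List (List Int)) (prev : List Int)
    (hn : matrix.length = n)
    (hprev : ∀ j, j < n → prev.getD j 0 = (matrix.getD (n - 1) []).getD j 0) :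
    ∀ i, i < n → ∀ j, j < n → (chainRow n prev matrix i).getD j 0 = Gm matrix n j i := by
  intro i
  induction i with
  | zero =>
    intro hi j hj
    cases matrix with
    | nil => simp at hn; omega
    | cons r rs =>
      rw [chain_zero_getD n prev r rs j hj, Gm]
      simp only [List.getD_cons_zero]
      rw [hprev j hj]
  | succ i ih =>
    intro hi j hj
    rw [chain_succ_getD n i prev matrix j hj (by omega), Gm,
      ih (by omega) j hj]

-- the column-local recurrence B's fold computes
def Gc (c : List Int) (n : Nat) : Nat → Int
  | 0 => if c.getD 0 0 ≠ 0 then c.getD 0 0 else c.getD (n - 1) 0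
  | i + 1 => if c.getD (i + 1) 0 ≠ 0 then c.getD (i + 1) 0 else Gc c n i

-- B's per-column fold, one element at a time
theorem fill_spec (c : List Int) (n : Nat) : ∀ (m : Nat),
    ((List.range m).foldl (fstep c n) []).length = m ∧
    (∀ i, i < m → ((List.range m).foldl (fstep c n) []).getD i 0 = Gc c n i) := by
  intro m
  induction m with
  | zero => exact ⟨rfl, fun i h => absurd h (by omega)⟩
  | succ m ih =>
    obtain ⟨hlen, hget⟩ := ih
    rw [List.range_succ, List.foldl_append, List.foldl_cons, List.foldl_nil]
    set f := (List.range m).foldl (fstep c n) [] with hf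
    have hstep : ∃ w, fstep c n f m = f ++ [w] ∧ w = Gc c n m := by
      unfold fstep
      by_cases h1 : c.getD m 0 ≠ 0
      · refine ⟨c.getD m 0, by rw [if_pos h1], ?_⟩
        cases m with
        | zero => rw [Gc, if_pos h1]
        | succ m => rw [Gc, if_pos h1]
      · cases m with
        | zero =>
          refine ⟨c.getD (n - 1) 0, by rw [if_neg h1, if_pos rfl], ?_⟩
          rw [Gc, if_neg h1]
        | succ m =>
          refine ⟨f.getD (f.length - 1) 0, by rw [if_neg h1, if_neg (by omega)], ?_⟩
          rw [Gc, if_neg h1, hlen]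
          simpa using hget m (by omega)
    obtain ⟨w, hw, hwval⟩ := hstep
    rw [hw]
    refine ⟨by simp [hlen], ?_⟩
    intro i hi
    by_cases h2 : i < m
    · rw [List.getD_eq_getElem?_getD, List.getElem?_append_left (by omega),
        ← List.getD_eq_getElem?_getD]
      exact hget i h2
    · have : i = m := by omega
      subst this
      rw [List.getD_eq_getElem?_getD, List.getElem?_append_right (by omega), hlen]
      simpa using hwval

theorem col_getD (matrix : List (List Int)) (j i : Nat) (hi : i < matrix.length) :
    (matrix.map (fun row => row.getD j 0)).getD i 0 = (matrix.getD i []).getD j 0 := by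
  rw [List.getD_eq_getElem?_getD, List.getElem?_map, List.getElem?_eq_getElem hi,
    List.getD_eq_getElem matrix [] hi]
  simp [List.getD_eq_getElem?_getD]

theorem Gc_eq_Gm (matrix : List (List Int)) (n : Nat) (j : Nat) (hn : matrix.length = n)
    (hpos : 0 < n) :
    ∀ i, i < n → Gc (matrix.map (fun row => row.getD j 0)) n i = Gm matrix n j i := by
  intro i
  induction i with
  | zero =>
    intro hi
    rw [Gc, Gm, col_getD matrix j 0 (by omega), col_getD matrix j (n - 1) (by omega)]
  | succ i ih =>
    intro hi
    rw [Gc, Gm, col_getD matrix j (i + 1) (by omega), ih (by omega)]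

theorem map_getD_self (l : List Int) (n : Nat) (h : l.length = n) :
    (List.range n).map (fun j => l.getD j 0) = l := by
  apply List.ext_getElem
  · simp [h]
  · intro k h1 h2
    simp only [List.getElem_map, List.getElem_range, List.getD_eq_getElem?_getD]
    rw [List.getElem?_eq_getElem h2]
    rfl

theorem A_eq_bRows (matrix : List (List Int))
    (hpre : ∀ row ∈ matrix, matrix.length ≤ row.length) (hne : matrix ≠ []) :
    ReturnMatrix matrix =
      bRows matrix.length
        (((PySem.List.pyGet? matrix (-1)).getD []).take matrix.length) matrix := by
  simp only [ReturnMatrix]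
  rw [List.range_eq_range']
  have h := outer_loop matrix.length matrix [] []
    (((PySem.List.pyGet? matrix (-1)).getD []).take matrix.length)
    (by simp) hpre (by simp)
    (by
      intro j hj
      have hc : ((List.length ([] : List (List Int)) : Int) - 1) = (-1 : Int) := by simp
      rw [hc, List.nil_append]
      obtain ⟨L, hL⟩ := List.getLast?_isSome.mpr hne |> Option.isSome_iff_exists.mp
      rw [PySem.List.pyGet?_neg_one, hL]
      simp only [Option.getD_some]
      rw [List.getD_eq_getElem?_getD, List.getD_eq_getElem?_getD,
        List.getElem?_take_of_lt hj])
  simp only [List.range_eq_range'] at h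
  simpa using h

theorem main_equiv (matrix : List (List Int))
    (hpre : ∀ row ∈ matrix, matrix.length ≤ row.length) :
    ReturnMatrix matrix = ReturnMatrix_alt matrix := by
  cases matrix with
  | nil => rfl
  | cons r0 rs0 =>
    set M := r0 :: rs0 with hM
    have hne : M ≠ ([] : List (List Int)) := by simp [hM]
    set n := M.length with hn
    have hpos : 0 < n := by simp [hn, hM]
    set prev0 := ((PySem.List.pyGet? M (-1)).getD []).take n with hprev0
    have hprev : ∀ j, j < n → prev0.getD j 0 = (M.getD (n - 1) []).getD j 0 := by
      intro j hj
      obtain ⟨L, hL⟩ := List.getLast?_isSome.mpr hne |> Option.isSome_iff_exists.mp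
      rw [hprev0, PySem.List.pyGet?_neg_one, hL]
      simp only [Option.getD_some]
      have hlast : M.getD (n - 1) [] = L := by
        rw [List.getD_eq_getElem?_getD, ← List.getLast?_eq_getElem? , hL]
        rfl
      rw [hlast, List.getD_eq_getElem?_getD, List.getD_eq_getElem?_getD,
        List.getElem?_take_of_lt hj]
    rw [A_eq_bRows M hpre hne, ← hn, ← hprev0, bRows_eq_flat n M prev0]
    simp only [ReturnMatrix_alt]
    rw [← hn]
    apply List.flatMap_congr
    intro i hi
    have hin : i < n := by simpa using hi
    rw [List.map_map]
    have hmap : (List.range n).map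
          ((fun c => c.getD i 0) ∘ fun j => fillCol (M.map fun row => row.getD j 0) n)
        = (List.range n).map (fun j => (chainRow n prev0 M i).getD j 0) := by
      apply List.map_congr_left
      intro j hj
      have hjn : j < n := by simpa using hj
      simp only [Function.comp]
      have hfs := fill_spec (M.map fun row => row.getD j 0) n n
      rw [fillCol, hfs.2 i hin, Gc_eq_Gm M n j hn.symm hpos i hin,
        chain_eq_Gm n M prev0 hn.symm hprev i hin j hjn]
    rw [hmap, map_getD_self _ n (chain_length n M prev0 i (by omega))]

-- ===== VERDICT (by name: the statement is the Claim_ definition above) =====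
theorem ReturnMatrix_spec : Claim_equal_ReturnMatrix := by
  intro matrix _ hpre
  unfold Spec_ReturnMatrix
  exact main_equiv matrix hpre
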